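-- pv_equiv track=rewrite | github.com/LeetCode101/LeetCode-Python | leetcode/algorithms/p0249_group_shifted_strings.py | groupStrings
-- ===== SOURCE A (Python) =====
-- from typing import List
--
-- def groupStrings(strings: List[str]) -> List[List[str]]:
--     mapping = {}
--
--     for s in strings:
--         key = ()
--
--         for i in range(len(s) - 1):
--             diff = ord(s[i + 1]) - ord(s[i])
--             key += (diff % 26,)
--
--         mapping[key] = mapping.get(key, []) + [s]
--
--     return list(mapping.values())
-- ===== SOURCE B (Python) =====
-- from typing import List
--
-- def groupStrings(strings: List[str]) -> List[List[str]]: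
--     def diffs(s):
--         return [(ord(b) - ord(a)) % 26 for a, b in zip(s, s[1:])]
--
--     groups = []
--     for s in strings:
--         d = diffs(s)
--         for g in groups:
--             if diffs(g[0]) == d:
--                 g.append(s)
--                 break
--         else:
--             groups.append([s])
--     return groups
-- ===== Notes on version B (the rewrite author's own statement) =====
-- stated objective: alternative
-- what changed: Replaces the dict keyed by the mod-26 difference tuple with a plain list of groups: each new string is compared against the first element of every existing group by recomputing difference sequences, appending to the first matching group or starting a new one.
import Mathlib
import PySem

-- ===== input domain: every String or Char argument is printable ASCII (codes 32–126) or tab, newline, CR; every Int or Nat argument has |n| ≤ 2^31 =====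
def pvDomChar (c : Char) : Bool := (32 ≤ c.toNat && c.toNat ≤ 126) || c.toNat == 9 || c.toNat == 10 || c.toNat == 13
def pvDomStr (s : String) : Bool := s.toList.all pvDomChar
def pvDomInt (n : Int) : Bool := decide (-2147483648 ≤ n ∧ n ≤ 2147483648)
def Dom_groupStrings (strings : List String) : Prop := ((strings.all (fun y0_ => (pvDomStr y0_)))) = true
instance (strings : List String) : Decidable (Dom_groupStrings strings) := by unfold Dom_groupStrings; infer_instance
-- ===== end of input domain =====

-- B replaces A's dict keyed by mod-26 difference tuples with a list of groups scanned
-- against each group's first element (alternative decomposition, same return value).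


-- ===== PORT A =====
def groupStrings (strings : List String) : List (List String) :=
  let mapping : PySem.Dict (List Int) (List String) :=
    strings.foldl (fun mapping s =>
      let key : List Int :=
        (PySem.List.pyRange 0 (PySem.Str.len s - 1) 1).foldl
          (fun key i =>
            let diff : Int :=
              ((PySem.List.pyGetD s.toList (i + 1) ' ').toNat : Int) -
              ((PySem.List.pyGetD s.toList i ' ').toNat : Int)
            key ++ [PySem.Int.mod diff 26])
          []
      mapping.insert key (mapping.getD key [] ++ [s]))
      PySem.Dict.empty
  mapping.values

-- ===== PORT B =====
-- diffs(s) = [(ord(b) - ord(a)) % 26 for a, b in zip(s, s[1:])]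
def pvDiffs (cs : List Char) : List Int :=
  List.zipWith (fun a b => PySem.Int.mod ((b.toNat : Int) - (a.toNat : Int)) 26) cs cs.tail

def pvKey (s : String) : List Int := pvDiffs s.toList

-- Source B's inner for/else loop over groups: append to the first group whose first
-- element has the same difference sequence, else start a new group at the end
def pvInsertGroup (k : List Int) (s : String) : List (List String) → List (List String)
  | [] => [[s]]
  | g :: gs => if pvKey (g.headD "") = k then (g ++ [s]) :: gs else g :: pvInsertGroup k s gs

def groupStrings_alt (strings : List String) : List (List String) :=
  strings.foldl (fun gs s => pvInsertGroup (pvKey s) s gs) []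

-- ===== PRECONDITION & SPEC =====
def Spec_groupStrings (strings : List String) (out : List (List String)) : Prop := out = groupStrings_alt strings
instance (strings : List String) (out : List (List String)) : Decidable (Spec_groupStrings strings out) := by unfold Spec_groupStrings; infer_instance

-- ===== CLAIM (what is proved, stated in full; the proofs are below) =====
def Claim_equal_groupStrings : Prop := ∀ (strings : List String), Dom_groupStrings strings → Spec_groupStrings strings (groupStrings strings)

-- ===== LEMMAS AND PROOFS =====

-- A's inner key loop computes exactly B's difference sequence
lemma pvKeyA_eq (s : String) :
    (PySem.List.pyRange 0 (PySem.Str.len s - 1) 1).foldl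
      (fun key i =>
        key ++ [PySem.Int.mod
          (((PySem.List.pyGetD s.toList (i + 1) ' ').toNat : Int) -
           ((PySem.List.pyGetD s.toList i ' ').toNat : Int)) 26])
      [] = pvKey s := by
  rw [PySem.List.foldl_append_singleton_eq_map]
  rw [PySem.Str.len_eq, PySem.List.pyRange_one]
  simp only [List.map_map, List.nil_append]
  apply List.ext_getElem
  · simp [pvKey, pvDiffs, List.length_zipWith]
  · intro k h1 h2
    simp only [List.getElem_map, List.getElem_range, Function.comp, zero_add]
    have hk : k < s.toList.length - 1 := by
      simp only [List.length_map, List.length_range] at h1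
      omega
    rw [show ((k : Int) + 1) = ((k + 1 : Nat) : Int) by push_cast; ring]
    rw [PySem.List.pyGetD_natCast, PySem.List.pyGetD_natCast]
    rw [List.getD_eq_getElem _ _ (by omega : k + 1 < s.toList.length),
      List.getD_eq_getElem _ _ (by omega : k < s.toList.length)]
    simp [pvKey, pvDiffs, List.getElem_zipWith, List.getElem_tail]

-- the dict item that a group of B contributes: its key paired with the group
def pvPair (g : List String) : List Int × List String := (pvKey (g.headD ""), g)

lemma pvHeadD_append (g : List String) (s : String) (h : g ≠ []) :
    (g ++ [s]).headD "" = g.headD "" := by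
  cases g with
  | nil => exact absurd rfl h
  | cons a t => rfl

lemma pvInsertGroup_not_mem (k : List Int) (s : String) (gs : List (List String))
    (h : ∀ g ∈ gs, pvKey (g.headD "") ≠ k) :
    pvInsertGroup k s gs = gs ++ [[s]] := by
  induction gs with
  | nil => rfl
  | cons g rest ih =>
      simp only [pvInsertGroup]
      rw [if_neg (h g (by simp)), ih (fun g' hg' => h g' (by simp [hg']))]
      rfl

lemma pvInsertGroup_mem (k : List Int) (s : String) (g0 : List String) :
    ∀ gs : List (List String), (gs.map (fun g => pvKey (g.headD ""))).Nodup →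
    g0 ∈ gs → pvKey (g0.headD "") = k → g0 ≠ [] →
    (pvInsertGroup k s gs).map pvPair =
      gs.map (fun g => if pvKey (g.headD "") == k then (k, g0 ++ [s]) else pvPair g) := by
  intro gs
  induction gs with
  | nil => intro _ h; cases h
  | cons g rest ih =>
      intro hnd hmem hkey hne
      have hndc := List.nodup_cons.mp hnd
      by_cases hg : pvKey (g.headD "") = k
      · have hg0 : g0 = g := by
          rcases List.mem_cons.mp hmem with h | h
          · exact h
          · exfalso
            have hk : k ∈ rest.map (fun g => pvKey (g.headD "")) := by
              rw [← hkey]; exact List.mem_map_of_mem h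
            refine hndc.1 ?_
            show pvKey (g.headD "") ∈ _
            rw [hg]; exact hk
        subst hg0
        simp only [pvInsertGroup]
        rw [if_pos hg, List.map_cons, List.map_cons]
        rw [show pvPair (g0 ++ [s]) = (k, g0 ++ [s]) by
          simp only [pvPair, pvHeadD_append _ _ hne, hg]]
        rw [if_pos (by simp only [beq_iff_eq]; exact hg)]
        congr 1
        apply List.map_congr_left
        intro g' hg'
        have hne' : pvKey (g'.headD "") ≠ k := fun hc =>
          hndc.1 (by show pvKey (g0.headD "") ∈ _
                     rw [hg, ← hc]; exact List.mem_map_of_mem hg')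
        rw [if_neg (by simpa using hne')]
      · have hg0r : g0 ∈ rest := by
          rcases List.mem_cons.mp hmem with h | h
          · exact absurd (h ▸ hkey) hg
          · exact h
        simp only [pvInsertGroup]
        rw [if_neg hg, List.map_cons, List.map_cons,
          ih hndc.2 hg0r hkey hne, if_neg (by simpa using hg)]

lemma pvInsertGroup_ne_nil (k : List Int) (s : String) :
    ∀ gs : List (List String), (∀ g ∈ gs, g ≠ []) →
    ∀ g ∈ pvInsertGroup k s gs, g ≠ [] := by
  intro gs
  induction gs with
  | nil => intro _ g hg; simp [pvInsertGroup] at hg; simp [hg]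
  | cons g0 rest ih =>
      intro h g hg
      simp only [pvInsertGroup] at hg
      split at hg
      · rcases List.mem_cons.mp hg with h' | h'
        · subst h'; simp
        · exact h g (List.mem_cons_of_mem _ h')
      · rcases List.mem_cons.mp hg with h' | h'
        · subst h'; exact h g (by simp)
        · exact ih (fun g' hg' => h g' (List.mem_cons_of_mem _ hg')) g h'

-- one string processed: the dict step of A matches the group step of B
lemma pvStep (m : PySem.Dict (List Int) (List String)) (gs : List (List String)) (s : String)
    (h1 : m.items = gs.map pvPair)
    (h2 : (gs.map (fun g => pvKey (g.headD ""))).Nodup)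
    (h3 : ∀ g ∈ gs, g ≠ []) :
    (m.insert (pvKey s) (m.getD (pvKey s) [] ++ [s])).items =
        (pvInsertGroup (pvKey s) s gs).map pvPair ∧
      ((pvInsertGroup (pvKey s) s gs).map (fun g => pvKey (g.headD ""))).Nodup ∧
      (∀ g ∈ pvInsertGroup (pvKey s) s gs, g ≠ []) := by
  have hkeys : m.keys = gs.map (fun g => pvKey (g.headD "")) := by
    show m.items.map (·.1) = _
    rw [h1, List.map_map]; rfl
  by_cases hmem : ∃ g0 ∈ gs, pvKey (g0.headD "") = pvKey s
  · obtain ⟨g0, hg0, hk0⟩ := hmem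
    have hcon : m.contains (pvKey s) = true := by
      rw [PySem.Dict.contains_eq_decide_mem_keys, hkeys, decide_eq_true_iff]
      rw [← hk0]; exact List.mem_map_of_mem hg0
    have hitem : (pvKey s, g0) ∈ m.items := by
      rw [h1, ← hk0]; exact List.mem_map_of_mem hg0
    have hgetD : m.getD (pvKey s) [] = g0 :=
      PySem.Dict.getD_of_mem_items m hitem (by rw [hkeys]; exact h2) []
    have hrepl := pvInsertGroup_mem (pvKey s) s g0 gs h2 hg0 hk0 (h3 g0 hg0)
    have hmapkeys : (pvInsertGroup (pvKey s) s gs).map (fun g => pvKey (g.headD "")) =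
        gs.map (fun g => pvKey (g.headD "")) := by
      have hc := congrArg (List.map (Prod.fst : List Int × List String → List Int)) hrepl
      rw [List.map_map, List.map_map] at hc
      rw [show ((Prod.fst : List Int × List String → List Int) ∘ pvPair) =
        (fun g => pvKey (g.headD "")) from rfl] at hc
      rw [hc]
      apply List.map_congr_left
      intro g hg
      by_cases hc' : pvKey (g.headD "") = pvKey s
      · simp only [Function.comp_apply, hc', beq_self_eq_true, if_pos]
      · simp only [Function.comp_apply, pvPair]
        rw [if_neg (by simpa using hc')]
    refine ⟨?_, ?_, pvInsertGroup_ne_nil _ _ _ h3⟩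
    · rw [PySem.Dict.items_insert_of_contains m _ hcon, hgetD, h1, hrepl, List.map_map]
      rfl
    · rw [hmapkeys]; exact h2
  · push Not at hmem
    have hcon : m.contains (pvKey s) = false := by
      rw [PySem.Dict.contains_eq_decide_mem_keys, hkeys, decide_eq_false_iff_not]
      intro h
      obtain ⟨g0, hg0, hk0⟩ := List.mem_map.mp h
      exact hmem g0 hg0 hk0
    have hins := pvInsertGroup_not_mem (pvKey s) s gs hmem
    refine ⟨?_, ?_, pvInsertGroup_ne_nil _ _ _ h3⟩
    · rw [PySem.Dict.items_insert_of_not_contains m _ hcon,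
        PySem.Dict.getD_of_not_contains m _ hcon, h1, hins, List.map_append]
      rfl
    · rw [hins, List.map_append]
      simp only [List.map_cons, List.map_nil]
      rw [List.nodup_append]
      refine ⟨h2, List.nodup_singleton _, ?_⟩
      intro k' hk' b hb hk2
      have hb' : b = pvKey ([s].headD "") := by
        rcases List.mem_singleton.mp hb with h; exact h
      obtain ⟨g0, hg0, hkg⟩ := List.mem_map.mp hk'
      refine hmem g0 hg0 ?_
      have : pvKey (g0.headD "") = b := (show pvKey (g0.headD "") = k' from hkg).trans hk2
      rw [this, hb']
      rfl

-- the whole fold: A's dict items always mirror B's group list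
lemma pvFold (l : List String) :
    ∀ (m : PySem.Dict (List Int) (List String)) (gs : List (List String)),
    m.items = gs.map pvPair →
    (gs.map (fun g => pvKey (g.headD ""))).Nodup →
    (∀ g ∈ gs, g ≠ []) →
    (l.foldl (fun m s => m.insert (pvKey s) (m.getD (pvKey s) [] ++ [s])) m).items =
      (l.foldl (fun gs s => pvInsertGroup (pvKey s) s gs) gs).map pvPair := by
  induction l with
  | nil => intro m gs h1 _ _; simpa using h1
  | cons s rest ih =>
      intro m gs h1 h2 h3
      obtain ⟨j1, j2, j3⟩ := pvStep m gs s h1 h2 h3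
      simpa using ih _ _ j1 j2 j3

-- ===== VERDICT (by name: the statement is the Claim_ definition above) =====
theorem groupStrings_spec : Claim_equal_groupStrings := by
  intro strings _
  show groupStrings strings = groupStrings_alt strings
  unfold groupStrings groupStrings_alt
  have hfun : (fun (mapping : PySem.Dict (List Int) (List String)) (s : String) =>
      let key : List Int :=
        (PySem.List.pyRange 0 (PySem.Str.len s - 1) 1).foldl
          (fun key i =>
            let diff : Int :=
              ((PySem.List.pyGetD s.toList (i + 1) ' ').toNat : Int) -
              ((PySem.List.pyGetD s.toList i ' ').toNat : Int)
            key ++ [PySem.Int.mod diff 26])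
          []
      mapping.insert key (mapping.getD key [] ++ [s])) =
      (fun m s => m.insert (pvKey s) (m.getD (pvKey s) [] ++ [s])) := by
    funext m s
    show (m.insert _ (m.getD _ [] ++ [s])) = _
    rw [pvKeyA_eq]
  rw [hfun]
  show (strings.foldl (fun m s => m.insert (pvKey s) (m.getD (pvKey s) [] ++ [s]))
      PySem.Dict.empty).items.map (·.2) = _
  rw [pvFold strings PySem.Dict.empty [] (by rfl) (by simp) (by simp), List.map_map]
  exact List.map_congr_left (fun g _ => rfl) |>.trans (List.map_id _)
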